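-- pv_equiv track=rewrite | github.com/soumitra-fr/Native-Python-Compiler | compiler/runtime/import_system.py | check_import_permissions
-- ===== SOURCE A (Python) =====
-- def check_import_permissions(module_name, restricted_modules=None):
--     """
--     Check if a module is allowed to be imported.
--
--     Args:
--         module_name: Name of module
--         restricted_modules: List of restricted module names
--
--     Returns:
--         True if allowed, False otherwise
--     """
--     if restricted_modules is None:
--         restricted_modules = []
--
--     # Check if module or any parent is restricted
--     parts = module_name.split('.')
--     for i in range(len(parts)):
--         prefix = '.'.join(parts[:i+1])
--         if prefix in restricted_modules:
--             return False
--
--     return True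
-- ===== SOURCE B (Python) =====
-- def check_import_permissions(module_name, restricted_modules=None):
--     """
--     Check if a module is allowed to be imported.
--
--     Loops over the restricted list instead of building every dotted prefix:
--     an entry r blocks module_name iff it equals it or is a dot-boundary
--     prefix of it.
--     """
--     if restricted_modules is None:
--         restricted_modules = []
--     for r in restricted_modules:
--         if module_name == r or module_name.startswith(r + '.'):
--             return False
--     return True
-- ===== Notes on version B (the rewrite author's own statement) =====
-- stated objective: idiomatic
-- what changed: B iterates over restricted_modules once, testing whether each entry equals module_name or is a dot-boundary prefix of it, instead of building every dotted prefix of module_name and scanning the restricted list for each.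
import Mathlib
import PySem

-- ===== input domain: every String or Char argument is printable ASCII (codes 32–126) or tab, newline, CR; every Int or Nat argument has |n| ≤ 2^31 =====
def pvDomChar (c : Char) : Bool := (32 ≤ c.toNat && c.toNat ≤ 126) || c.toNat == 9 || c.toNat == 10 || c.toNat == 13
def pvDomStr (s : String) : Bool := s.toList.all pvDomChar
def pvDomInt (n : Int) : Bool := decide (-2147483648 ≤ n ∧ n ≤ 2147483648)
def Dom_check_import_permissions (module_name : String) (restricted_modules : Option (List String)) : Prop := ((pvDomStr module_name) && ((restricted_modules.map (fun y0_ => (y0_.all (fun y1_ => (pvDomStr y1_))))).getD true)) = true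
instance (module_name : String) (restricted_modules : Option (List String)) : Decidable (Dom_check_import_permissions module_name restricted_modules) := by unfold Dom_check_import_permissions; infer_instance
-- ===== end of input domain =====

-- B replaces A's "build every dotted prefix of module_name, scan the restricted list for each"
-- by one loop over restricted_modules testing each entry as a dot-boundary prefix (idiomatic).

-- ===== PORT A =====
-- the 'for i in range(len(parts)): … return False' loop, as structural recursion over the index list
def pvALoop (rms parts : List String) : List Nat → Bool
  | [] => true
  | i :: rest =>
    if rms.contains (PySem.Str.join "." (parts.take (i + 1))) then false
    else pvALoop rms parts rest

def check_import_permissions (module_name : String) (restricted_modules : Option (List String)) : Bool :=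
  let rms := restricted_modules.getD []
  -- parts = module_name.split('.'); the separator "." is nonempty so split? is always `some`
  let parts := (PySem.Str.split? module_name ".").getD []
  -- parts[:i+1] is List.take (i+1) exactly, since 0 ≤ i < len(parts)
  pvALoop rms parts (List.range parts.length)

-- ===== PORT B =====
-- the 'for r in restricted_modules: … return False' loop of Source B
def pvBLoop (module_name : String) : List String → Bool
  | [] => true
  | r :: rest =>
    if module_name == r || PySem.Str.startswith module_name (r ++ ".") then false
    else pvBLoop module_name rest

def check_import_permissions_alt (module_name : String) (restricted_modules : Option (List String)) : Bool :=
  let rms := restricted_modules.getD []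
  pvBLoop module_name rms

-- ===== PRECONDITION & SPEC =====
def Spec_check_import_permissions (module_name : String) (restricted_modules : Option (List String)) (out : Bool) : Prop := out = check_import_permissions_alt module_name restricted_modules
instance (module_name : String) (restricted_modules : Option (List String)) (out : Bool) : Decidable (Spec_check_import_permissions module_name restricted_modules out) := by unfold Spec_check_import_permissions; infer_instance

-- ===== CLAIM (what is proved, stated in full; the proofs are below) =====
def Claim_equal_check_import_permissions : Prop := ∀ (module_name : String) (restricted_modules : Option (List String)), Dom_check_import_permissions module_name restricted_modules → Spec_check_import_permissions module_name restricted_modules (check_import_permissions module_name restricted_modules)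

-- ===== LEMMAS AND PROOFS =====

-- unfolding equations for PySem's fuel-based splitOn.go
theorem pvGo_nil (c : Char) (fuel : Nat) (cur : List Char) (acc : List (List Char)) :
    PySem.Chars.splitOn.go [c] fuel [] cur acc = (cur.reverse :: acc).reverse := by
  rw [PySem.Chars.splitOn.go.eq_def]
  cases fuel <;> simp

theorem pvGo_cons (c : Char) (fuel : Nat) (ch : Char) (rest cur : List Char)
    (acc : List (List Char)) :
    PySem.Chars.splitOn.go [c] (fuel + 1) (ch :: rest) cur acc
      = if [c].isPrefixOf (ch :: rest) then
          PySem.Chars.splitOn.go [c] fuel rest [] (cur.reverse :: acc)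
        else PySem.Chars.splitOn.go [c] fuel rest (ch :: cur) acc := by
  rw [PySem.Chars.splitOn.go.eq_def]
  simp

-- PySem's fuel-based splitOn on a one-character separator is Mathlib's List.splitOn
theorem pvGo_eq (c : Char) (fuel : Nat) :
    ∀ (l cur : List Char) (acc : List (List Char)), l.length ≤ fuel →
      PySem.Chars.splitOn.go [c] fuel l cur acc
        = acc.reverse ++ (l.splitOn c).modifyHead (cur.reverse ++ ·) := by
  induction fuel with
  | zero =>
    intro l cur acc h
    have hl : l = [] := List.length_eq_zero_iff.mp (Nat.le_zero.mp h)
    subst hl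
    rw [pvGo_nil]
    simp [List.splitOn, List.splitOnP_nil]
  | succ fuel ih =>
    intro l cur acc h
    cases l with
    | nil =>
      rw [pvGo_nil]
      simp [List.splitOn, List.splitOnP_nil]
    | cons ch rest =>
      rw [pvGo_cons]
      by_cases hch : ch = c
      · subst hch
        rw [if_pos (by simp [List.isPrefixOf])]
        rw [ih _ [] _ (by simpa using Nat.succ_le_succ_iff.mp h)]
        have hne := List.splitOnP_ne_nil (fun x => x == ch) rest
        obtain ⟨a, t, hat⟩ := List.exists_cons_of_ne_nil hne
        simp [List.splitOn, List.splitOnP_cons, hat, List.modifyHead]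
      · rw [if_neg (by simp [List.isPrefixOf]; exact fun hc => absurd hc.symm hch)]
        rw [ih rest (ch :: cur) acc (by simpa using Nat.succ_le_succ_iff.mp h)]
        have hne := List.splitOnP_ne_nil (fun x => x == c) rest
        obtain ⟨a, t, hat⟩ := List.exists_cons_of_ne_nil hne
        simp [List.splitOn, List.splitOnP_cons, hch, hat, List.modifyHead]

theorem pvSplitOn_eq (cs : List Char) (c : Char) :
    PySem.Chars.splitOn cs [c] = cs.splitOn c := by
  rw [PySem.Chars.splitOn, pvGo_eq c (cs.length + 1) cs [] [] (Nat.le_succ _)]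
  have hne := List.splitOnP_ne_nil (fun x => x == c) cs
  obtain ⟨a, t, hat⟩ := List.exists_cons_of_ne_nil hne
  simp [List.splitOn, hat, List.modifyHead]

-- the separator never occurs inside a piece of List.splitOn
theorem pvSplitOn_cons (c x : Char) (xs : List Char) :
    (x :: xs).splitOn c
      = if x = c then [] :: xs.splitOn c else (xs.splitOn c).modifyHead (List.cons x) := by
  simp only [List.splitOn, List.splitOnP_cons, beq_iff_eq]

theorem pvSplitOn_ne_nil (c : Char) (xs : List Char) : xs.splitOn c ≠ [] := by
  simp only [List.splitOn]
  exact List.splitOnP_ne_nil _ _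

theorem pvNotMem_splitOn (cs : List Char) (c : Char) :
    ∀ l ∈ cs.splitOn c, c ∉ l := by
  induction cs with
  | nil => simp [List.splitOn, List.splitOnP_nil]
  | cons x xs ih =>
    intro l hl
    rw [pvSplitOn_cons] at hl
    by_cases hx : x = c
    · rw [if_pos hx] at hl
      rcases List.mem_cons.mp hl with rfl | hl
      · simp
      · exact ih l hl
    · rw [if_neg hx] at hl
      obtain ⟨a, t, hat⟩ := List.exists_cons_of_ne_nil (pvSplitOn_ne_nil c xs)
      rw [hat] at hl
      simp only [List.modifyHead] at hl
      rcases List.mem_cons.mp hl with rfl | hl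
      · intro hmem
        rcases List.mem_cons.mp hmem with h | h
        · exact hx h.symm
        · exact ih a (hat ▸ List.mem_cons_self) h
      · exact ih l (hat ▸ List.mem_cons_of_mem _ hl)

-- the heart: the dotted prefixes of join P are exactly {p : p = join P ∨ p ++ ['.'] <+: join P}
theorem pvGen (P : List (List Char)) (hP : P ≠ []) (hc : ∀ l ∈ P, ('.' : Char) ∉ l)
    (p : List Char) :
    (∃ i, i < P.length ∧ PySem.Chars.join ['.'] (P.take (i + 1)) = p)
      ↔ (p = PySem.Chars.join ['.'] P ∨ p ++ ['.'] <+: PySem.Chars.join ['.'] P) := by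
  induction P generalizing p with
  | nil => exact absurd rfl hP
  | cons a Q ih =>
    cases Q with
    | nil =>
      rw [PySem.Chars.join_singleton]
      constructor
      · rintro ⟨i, hi, hji⟩
        have hi0 : i = 0 := by simpa using hi
        subst hi0
        simp [PySem.Chars.join_singleton] at hji
        exact Or.inl hji.symm
      · rintro (h | h)
        · exact ⟨0, by simp, by simp [PySem.Chars.join_singleton, h]⟩
        · exact absurd (h.sublist.mem (by simp)) (hc a (by simp))
    | cons b t =>
      have hQne : (b :: t : List (List Char)) ≠ [] := by simp
      have hcQ : ∀ l ∈ (b :: t : List (List Char)), ('.' : Char) ∉ l :=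
        fun l hl => hc l (List.mem_cons_of_mem _ hl)
      have hda : ('.' : Char) ∉ a := hc a List.mem_cons_self
      rw [PySem.Chars.join_cons_cons]
      constructor
      · rintro ⟨i, hi, hji⟩
        cases i with
        | zero =>
          simp only [List.take_succ_cons, List.take_zero, PySem.Chars.join_singleton] at hji
          subst hji
          right
          rw [List.append_assoc]
          exact ⟨PySem.Chars.join ['.'] (b :: t), by simp⟩
        | succ j =>
          have hj : j < (b :: t).length := by simpa using hi
          have htk : List.take (j + 1 + 1) (a :: b :: t) = a :: List.take (j + 1) (b :: t) := rfl
          rw [htk] at hji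
          have htk2 : List.take (j + 1) (b :: t : List (List Char)) = b :: List.take j t := rfl
          rw [htk2, PySem.Chars.join_cons_cons] at hji
          have hIH := (ih hQne hcQ (PySem.Chars.join ['.'] (b :: List.take j t))).mp
            ⟨j, hj, by rw [htk2]⟩
          rcases hIH with h | h
          · left; rw [← hji, h]
          · right
            rw [← hji]
            have hassoc : a ++ ['.'] ++ PySem.Chars.join ['.'] (b :: List.take j t) ++ ['.']
                = a ++ ['.'] ++ (PySem.Chars.join ['.'] (b :: List.take j t) ++ ['.']) := by
              simp [List.append_assoc]
            rw [hassoc]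
            exact (List.prefix_append_right_inj (a ++ ['.'])).mpr h
      · rintro (h | h)
        · refine ⟨(b :: t).length, by simp, ?_⟩
          have hta : List.take ((b :: t).length + 1) (a :: b :: t) = a :: b :: t :=
            List.take_of_length_le (by simp)
          rw [hta, PySem.Chars.join_cons_cons, h]
        · rcases Nat.lt_trichotomy p.length a.length with hlt | heq | hgt
          · exfalso
            have hpfx : p ++ ['.'] <+: a :=
              List.prefix_of_prefix_length_le h
                (List.prefix_append a _ |>.trans (by rw [List.append_assoc]))
                (by simp; omega)
            exact hda (hpfx.sublist.mem (by simp))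
          · have hpa : p = a := by
              have h1 : p <+: a ++ ['.'] ++ PySem.Chars.join ['.'] (b :: t) :=
                (List.prefix_append p ['.']).trans h
              have h2 : a <+: a ++ ['.'] ++ PySem.Chars.join ['.'] (b :: t) := by
                rw [List.append_assoc]; exact List.prefix_append a _
              exact List.IsPrefix.eq_of_length
                (List.prefix_of_prefix_length_le h1 h2 (le_of_eq heq)) heq
            exact ⟨0, by simp, by simp [hpa]⟩
          · have h1 : a ++ ['.'] <+: a ++ ['.'] ++ PySem.Chars.join ['.'] (b :: t) :=
              List.prefix_append _ _
            have h2 : p <+: a ++ ['.'] ++ PySem.Chars.join ['.'] (b :: t) :=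
              (List.prefix_append p ['.']).trans h
            have h3 : a ++ ['.'] <+: p :=
              List.prefix_of_prefix_length_le h1 h2 (by simp; omega)
            obtain ⟨q, hq⟩ := h3
            subst hq
            have h4 : q ++ ['.'] <+: PySem.Chars.join ['.'] (b :: t) := by
              have h5 := h
              rw [List.append_assoc (a ++ ['.']) q ['.']] at h5
              exact (List.prefix_append_right_inj (a ++ ['.'])).mp h5
            obtain ⟨j, hj, hje⟩ := (ih hQne hcQ q).mpr (Or.inr h4)
            refine ⟨j + 1, by simpa using Nat.succ_lt_succ hj, ?_⟩
            have htk : List.take (j + 1 + 1) (a :: b :: t) = a :: List.take (j + 1) (b :: t) := rfl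
            rw [htk]
            have htk2 : List.take (j + 1) (b :: t : List (List Char)) = b :: List.take j t := rfl
            rw [htk2, PySem.Chars.join_cons_cons, ← htk2, hje]

-- A's loop returns true iff no visited dotted prefix is restricted
theorem pvALoop_true_iff (rms parts : List String) (is : List Nat) :
    pvALoop rms parts is = true
      ↔ ∀ i ∈ is, PySem.Str.join "." (parts.take (i + 1)) ∉ rms := by
  induction is with
  | nil => simp [pvALoop]
  | cons i rest ih =>
    rw [pvALoop]
    split_ifs with hmem
    · simp only [false_iff]
      intro hall
      exact hall i (List.mem_cons_self) (by simpa using hmem)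
    · simp only [ih, List.mem_cons]
      constructor
      · rintro hall j (rfl | hj)
        · simpa using hmem
        · exact hall j hj
      · intro hall j hj
        exact hall j (Or.inr hj)

-- B's loop returns true iff no restricted entry is a dot-boundary prefix
theorem pvBLoop_true_iff (m : String) (rs : List String) :
    pvBLoop m rs = true
      ↔ ∀ r ∈ rs, ¬(m = r ∨ r.toList ++ ['.'] <+: m.toList) := by
  induction rs with
  | nil => simp [pvBLoop]
  | cons r rest ih =>
    rw [pvBLoop]
    have hcond : (m == r || PySem.Str.startswith m (r ++ ".")) = true
        ↔ (m = r ∨ r.toList ++ ['.'] <+: m.toList) := by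
      simp [PySem.Str.startswith, PySem.Chars.startswith_iff, String.toList_append]
    split_ifs with hif
    · simp only [false_iff]
      intro hall
      exact hall r List.mem_cons_self (hcond.mp hif)
    · simp only [ih, List.mem_cons]
      constructor
      · rintro hall s (rfl | hs)
        · exact fun hcc => hif (hcond.mpr hcc)
        · exact hall s hs
      · intro hall s hs
        exact hall s (Or.inr hs)

-- per-entry bridge: r is one of A's dotted prefixes iff r blocks in B's sense
theorem pvEntry_iff (m r : String) :
    (∃ i, i < (m.toList.splitOn '.').length ∧
        PySem.Str.join "." (((m.toList.splitOn '.').map String.ofList).take (i + 1)) = r)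
      ↔ (m = r ∨ r.toList ++ ['.'] <+: m.toList) := by
  have hjoinP : PySem.Chars.join ['.'] (m.toList.splitOn '.') = m.toList := by
    rw [PySem.Chars.join]
    exact List.intercalate_splitOn m.toList '.'
  have hstr : ∀ k : Nat,
      (PySem.Str.join "." (((m.toList.splitOn '.').map String.ofList).take k)).toList
        = PySem.Chars.join ['.'] ((m.toList.splitOn '.').take k) := by
    intro k
    simp [PySem.Str.join, List.map_map, Function.comp_def]
  have hgen := pvGen (m.toList.splitOn '.')
    (by simpa [List.splitOn] using List.splitOnP_ne_nil (fun x => x == '.') m.toList)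
    (pvNotMem_splitOn m.toList '.') r.toList
  rw [hjoinP] at hgen
  constructor
  · rintro ⟨i, hi, hji⟩
    have : PySem.Chars.join ['.'] ((m.toList.splitOn '.').take (i + 1)) = r.toList := by
      rw [← hstr (i + 1), hji]
    rcases hgen.mp ⟨i, hi, this⟩ with h | h
    · exact Or.inl (String.toList_inj.mp h.symm)
    · exact Or.inr h
  · intro h
    have h' : r.toList = m.toList ∨ r.toList ++ ['.'] <+: m.toList := by
      rcases h with h | h
      · exact Or.inl (by rw [h])
      · exact Or.inr h
    obtain ⟨i, hi, hji⟩ := hgen.mpr h'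
    exact ⟨i, hi, String.toList_inj.mp (by rw [hstr (i + 1), hji])⟩

-- the two ports agree for an explicit restricted list
theorem pvMain (m : String) (rms : List String) :
    check_import_permissions m (some rms) = check_import_permissions_alt m (some rms) := by
  unfold check_import_permissions check_import_permissions_alt
  simp only [Option.getD_some]
  have hparts : (PySem.Str.split? m ".").getD []
      = (m.toList.splitOn '.').map String.ofList := by
    have hdot : ("." : String).toList = ['.'] := by decide
    simp [PySem.Str.split?, PySem.Chars.split?, hdot, pvSplitOn_eq]
  rw [hparts]
  have hA := pvALoop_true_iff rms ((m.toList.splitOn '.').map String.ofList)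
    (List.range ((m.toList.splitOn '.').map String.ofList).length)
  have hB := pvBLoop_true_iff m rms
  rw [Bool.eq_iff_iff, hA, hB]
  simp only [List.mem_range, List.length_map]
  constructor
  · intro hall r hr hblock
    obtain ⟨i, hi, hji⟩ := (pvEntry_iff m r).mpr hblock
    exact hall i hi (hji ▸ hr)
  · intro hall i hi hmem
    have hblock := (pvEntry_iff m
      (PySem.Str.join "." (((m.toList.splitOn '.').map String.ofList).take (i + 1)))).mp
      ⟨i, hi, rfl⟩
    exact hall _ hmem hblock

-- ===== VERDICT (by name: the statement is the Claim_ definition above) =====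
theorem check_import_permissions_spec : Claim_equal_check_import_permissions := by
  intro m R _
  unfold Spec_check_import_permissions
  cases R with
  | none =>
    have h := pvMain m []
    simpa [check_import_permissions, check_import_permissions_alt] using h
  | some rms => exact pvMain m rms
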